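-- pv_equiv track=rewrite | github.com/rileylemm/chatmind | chatmind/pipeline/tagging/post_process_tags.py | fix_domain_field
-- ===== SOURCE A (Python) =====
-- def fix_domain_field(domain: str) -> str:
--     """Fix Gemma-2B's domain field which sometimes includes the full enum."""
--     if not domain:
--         return "unknown"
--
--     # Gemma sometimes returns the full enum string instead of a single value
--     if "|" in domain:
--         # Extract the first valid domain from the enum
--         domains = domain.split("|")
--         for d in domains:
--             d = d.strip().lower()
--             if d in ["technical", "personal", "medical", "business", "creative"]:
--                 return d
--         return "unknown"
--
--     # Normalize single domain
--     domain = domain.strip().lower()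
--     if domain in ["technical", "personal", "medical", "business", "creative"]:
--         return domain
--
--     return "unknown"
-- ===== SOURCE B (Python) =====
-- VALID_DOMAINS = {"technical", "personal", "medical", "business", "creative"}
--
--
-- def fix_domain_field(domain: str) -> str:
--     """Single char-level scan: accumulate a token, finalize at each '|' (a
--     sentinel '|' is appended so the last token is finalized too); return the
--     first finalized token that normalizes to a valid domain."""
--     token = []
--     for ch in domain + "|":
--         if ch == "|":
--             d = "".join(token).strip().lower()
--             if d in VALID_DOMAINS:
--                 return d
--             token = []
--         else:
--             token.append(ch)
--     return "unknown"
-- ===== Notes on version B (the rewrite author's own statement) =====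
-- stated objective: alternative
-- what changed: Replaces A's branch structure (empty check, pipe-membership test, str.split plus a loop, and a duplicated single-domain block) by one character-level scan with an accumulated token and a trailing sentinel separator, finalizing and testing each token in place; no split, no membership test, no separate branches.
import Mathlib
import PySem

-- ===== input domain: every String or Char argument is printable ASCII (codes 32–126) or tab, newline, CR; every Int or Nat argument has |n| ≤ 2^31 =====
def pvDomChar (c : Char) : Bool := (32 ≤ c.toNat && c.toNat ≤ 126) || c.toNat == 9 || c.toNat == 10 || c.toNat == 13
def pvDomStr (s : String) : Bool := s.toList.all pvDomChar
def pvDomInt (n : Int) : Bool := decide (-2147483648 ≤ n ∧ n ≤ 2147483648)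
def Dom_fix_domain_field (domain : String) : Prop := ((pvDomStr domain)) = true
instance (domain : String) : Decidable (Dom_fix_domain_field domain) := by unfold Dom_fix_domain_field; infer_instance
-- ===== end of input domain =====

-- B replaces A's branches + str.split by one character-level scan with a token accumulator and a sentinel '|'; objective: alternative.

-- ===== PORT A =====
-- the 'for d in domains: … return d … / return "unknown"' loop of A
def fixLoopA : List String → String
  | [] => "unknown"
  | d :: rest =>
    let d' := PySem.Str.lower (PySem.Str.strip d)
    if ["technical", "personal", "medical", "business", "creative"].contains d' then d'
    else fixLoopA rest

def fix_domain_field (domain : String) : String :=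
  if domain == "" then "unknown"
  else if PySem.Str.isIn "|" domain then
    fixLoopA ((PySem.Str.split? domain "|").getD [])
  else
    let d := PySem.Str.lower (PySem.Str.strip domain)
    if ["technical", "personal", "medical", "business", "creative"].contains d then d
    else "unknown"

-- ===== PORT B =====
def validDomainsB : PySem.Set String :=
  PySem.Set.ofList ["technical", "personal", "medical", "business", "creative"]

-- the 'for ch in domain + "|": …' scan of Source B: state = accumulated token;
-- at each '|' the token is finalized (strip+lower), tested, and reset
def scanB : List Char → List Char → String
  | [], _tok => "unknown"
  | c :: rest, tok =>
    if c = '|' then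
      let d := PySem.Str.lower (PySem.Str.strip (String.ofList tok))
      if PySem.Set.contains validDomainsB d then d else scanB rest []
    else scanB rest (tok ++ [c])

def fix_domain_field_alt (domain : String) : String :=
  scanB (domain.toList ++ ['|']) []

-- ===== PRECONDITION & SPEC =====
def Spec_fix_domain_field (domain : String) (out : String) : Prop := out = fix_domain_field_alt domain
instance (domain : String) (out : String) : Decidable (Spec_fix_domain_field domain out) := by unfold Spec_fix_domain_field; infer_instance

-- ===== CLAIM (what is proved, stated in full; the proofs are below) =====
def Claim_equal_fix_domain_field : Prop := ∀ (domain : String), Dom_fix_domain_field domain → Spec_fix_domain_field domain (fix_domain_field domain)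

-- ===== LEMMAS AND PROOFS =====

-- reference split on '|' used only by the proofs
def splitC : List Char → List (List Char)
  | [] => [[]]
  | c :: r =>
    if c = '|' then [] :: splitC r
    else
      match splitC r with
      | [] => [[c]]
      | t :: ts => (c :: t) :: ts

-- A's loop over char-lists
def fixLoopC : List (List Char) → String
  | [] => "unknown"
  | t :: ts =>
    let d := PySem.Str.lower (PySem.Str.strip (String.ofList t))
    if PySem.Set.contains validDomainsB d then d else fixLoopC ts

theorem contains_valid_eq (d : String) :
    PySem.Set.contains validDomainsB d
      = ["technical", "personal", "medical", "business", "creative"].contains d := by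
  rfl

theorem splitC_ne_nil (cs : List Char) : splitC cs ≠ [] := by
  cases cs with
  | nil => simp [splitC]
  | cons c r =>
    simp only [splitC]
    split
    · simp
    · split <;> simp

-- B's scan = A's loop over the split, with the pending token glued to the first piece
theorem scanB_eq (cs : List Char) : ∀ tok : List Char,
    scanB (cs ++ ['|']) tok =
      match splitC cs with
      | [] => "unknown"
      | t :: ts => fixLoopC ((tok ++ t) :: ts) := by
  induction cs with
  | nil =>
    intro tok
    simp only [List.nil_append, scanB, fixLoopC, splitC, List.append_nil]
    simp
  | cons c r ih =>
    intro tok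
    by_cases hc : c = '|'
    · subst hc
      simp only [List.cons_append]
      rw [show splitC ('|' :: r) = [] :: splitC r from by simp [splitC]]
      rw [show scanB ('|' :: (r ++ ['|'])) tok =
          (if validDomainsB.contains (PySem.Str.lower (PySem.Str.strip (String.ofList tok))) = true
           then PySem.Str.lower (PySem.Str.strip (String.ofList tok))
           else scanB (r ++ ['|']) []) from by simp [scanB]]
      rw [ih []]
      cases h : splitC r with
      | nil => exact absurd h (splitC_ne_nil r)
      | cons t ts =>
        by_cases hd : validDomainsB.contains (PySem.Str.lower (PySem.Str.strip (String.ofList tok))) = true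
        · simp [fixLoopC, hd]
        · simp [fixLoopC, hd]
    · simp only [List.cons_append, scanB, if_neg hc, splitC]
      rw [ih (tok ++ [c])]
      cases h : splitC r with
      | nil => exact absurd h (splitC_ne_nil r)
      | cons t ts => simp

-- splitOn's fuelled worker computes splitC
theorem go_eq (fuel : Nat) : ∀ (l cur : List Char) (acc : List (List Char)),
    l.length < fuel →
    PySem.Chars.splitOn.go ['|'] fuel l cur acc =
      acc.reverse ++ (match splitC l with
        | [] => []
        | t :: ts => (cur.reverse ++ t) :: ts) := by
  induction fuel with
  | zero => intro l cur acc h; omega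
  | succ fuel ih =>
    intro l cur acc h
    cases l with
    | nil =>
      rw [PySem.Chars.splitOn.go.eq_def]
      simp [splitC]
    | cons c rest =>
      have hpre : List.isPrefixOf ['|'] (c :: rest) = ('|' == c) := by
        simp [List.isPrefixOf]
      rw [PySem.Chars.splitOn.go.eq_def]
      simp only [hpre]
      by_cases hc : c = '|'
      · subst hc
        have hdrop : List.drop (['|'].length) ('|' :: rest) = rest := rfl
        simp only [beq_self_eq_true, if_true, hdrop]
        rw [ih rest [] (cur.reverse :: acc) (by simpa using Nat.lt_of_succ_lt_succ h)]
        rw [show splitC ('|' :: rest) = [] :: splitC rest from by simp [splitC]]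
        cases h' : splitC rest with
        | nil => exact absurd h' (splitC_ne_nil rest)
        | cons t ts => simp
      · have hb : ('|' == c) = false := by simp [beq_eq_false_iff_ne]; exact fun e => hc e.symm
        simp only [hb, Bool.false_eq_true, if_false]
        rw [ih rest (c :: cur) acc (by simpa using Nat.lt_of_succ_lt_succ h)]
        rw [show splitC (c :: rest) = (match splitC rest with
            | [] => [[c]]
            | t :: ts => (c :: t) :: ts) from by simp [splitC, hc]]
        cases h' : splitC rest with
        | nil => exact absurd h' (splitC_ne_nil rest)
        | cons t ts => simp

theorem splitOn_eq_splitC (cs : List Char) :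
    PySem.Chars.splitOn cs ['|'] = splitC cs := by
  rw [PySem.Chars.splitOn, go_eq (cs.length + 1) cs [] [] (Nat.lt_succ_self _)]
  cases h : splitC cs with
  | nil => exact absurd h (splitC_ne_nil cs)
  | cons t ts => simp

theorem fixLoopA_map (l : List (List Char)) :
    fixLoopA (l.map String.ofList) = fixLoopC l := by
  induction l with
  | nil => rfl
  | cons t ts ih =>
    simp only [List.map_cons, fixLoopA, fixLoopC, contains_valid_eq]
    split <;> simp [ih]

theorem splitC_no_sep (cs : List Char) (h : '|' ∉ cs) : splitC cs = [cs] := by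
  induction cs with
  | nil => rfl
  | cons c r ih =>
    have hc : c ≠ '|' := fun e => h (e ▸ List.mem_cons_self)
    simp only [splitC, if_neg hc, ih (fun hm => h (List.mem_cons_of_mem _ hm))]

theorem infix_singleton_of_mem {c : Char} {l : List Char} (h : c ∈ l) : [c] <:+: l := by
  obtain ⟨pre, suf, rfl⟩ := List.append_of_mem h
  exact ⟨pre, suf, by simp⟩

theorem not_mem_of_isIn_false (s : String) (h : PySem.Str.isIn "|" s = false) :
    '|' ∉ s.toList := by
  have h' : ¬ ['|'] <:+: s.toList := by
    have := (PySem.Chars.isIn_eq_false_iff ("|".toList) s.toList)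
    simpa [PySem.Str.isIn] using this.mp (by simpa [PySem.Str.isIn] using h)
  exact fun hm => h' (infix_singleton_of_mem hm)

-- B in closed form: the loop over the split of the whole string
theorem alt_eq (domain : String) :
    fix_domain_field_alt domain = fixLoopC (splitC domain.toList) := by
  rw [fix_domain_field_alt, scanB_eq]
  cases h : splitC domain.toList with
  | nil => exact absurd h (splitC_ne_nil _)
  | cons t ts => simp

-- ===== VERDICT (by name: the statement is the Claim_ definition above) =====
theorem fix_domain_field_spec : Claim_equal_fix_domain_field := by
  intro domain _
  unfold Spec_fix_domain_field fix_domain_field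
  rw [alt_eq]
  by_cases hemp : domain = ""
  · subst hemp; decide
  · simp only [beq_iff_eq, hemp, if_false]
    by_cases hbar : PySem.Str.isIn "|" domain = true
    · have hsplit : (PySem.Str.split? domain "|").getD []
          = (splitC domain.toList).map String.ofList := by
        rw [PySem.Str.split?, PySem.Chars.split?,
          show ("|".toList) = ['|'] from rfl]
        simp [splitOn_eq_splitC]
      rw [if_pos hbar, hsplit, fixLoopA_map]
    · have hf : PySem.Str.isIn "|" domain = false := by
        cases hx : PySem.Str.isIn "|" domain
        · rfl
        · exact absurd hx hbar
      have hf' : PySem.Chars.isIn ['|'] domain.toList = false := by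
        simpa [PySem.Str.isIn] using hf
      rw [if_neg (by simp [PySem.Str.isIn, hf']),
        splitC_no_sep _ (not_mem_of_isIn_false domain hf)]
      simp only [fixLoopC, String.ofList_toList]
      have hd' := contains_valid_eq (PySem.Str.lower (PySem.Str.strip domain))
      by_cases hd : PySem.Set.contains validDomainsB (PySem.Str.lower (PySem.Str.strip domain)) = true
      · rw [if_pos (hd' ▸ hd), if_pos hd]
      · rw [if_neg (fun hcon => hd (hd' ▸ hcon)), if_neg hd]
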